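-- pv_equiv track=rewrite | github.com/OlgaPetina/pyton | homework2.py | upper_from_random
-- ===== SOURCE A (Python) =====
-- def upper_from_random(n):
--     max_num = 0
--     while (n > 0):
--         digit = n % 10
--         n = n // 10
--         if max_num < digit:
--             max_num = digit
--     return max_num
-- ===== SOURCE B (Python) =====
-- def upper_from_random(n):
--     if n <= 0:
--         return 0
--     return max(int(d) for d in str(n))
-- ===== Notes on version B (the rewrite author's own statement) =====
-- stated objective: idiomatic
-- what changed: B replaces the explicit modulo/division accumulator loop with a single max over the decimal digits of str(n), guarding n <= 0 to return 0 as A's never-entered loop does.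
import Mathlib
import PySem

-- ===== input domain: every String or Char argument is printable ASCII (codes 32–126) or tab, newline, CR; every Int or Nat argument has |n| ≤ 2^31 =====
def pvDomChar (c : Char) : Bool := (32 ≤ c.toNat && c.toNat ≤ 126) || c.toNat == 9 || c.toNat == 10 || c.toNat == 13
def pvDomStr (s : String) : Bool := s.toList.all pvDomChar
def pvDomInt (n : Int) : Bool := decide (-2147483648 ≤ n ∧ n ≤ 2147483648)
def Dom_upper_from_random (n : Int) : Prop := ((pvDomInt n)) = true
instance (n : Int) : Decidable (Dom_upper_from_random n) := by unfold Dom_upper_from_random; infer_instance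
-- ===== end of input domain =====

-- B computes the largest decimal digit as one max over str(n) instead of A's modulo/division loop (same cost; more idiomatic).


-- ===== PORT A =====
-- the while loop: state (n, max_num); digit = n % 10, n = n // 10, max_num updated by comparison
def pvLoopA (n maxNum : Int) : Int :=
  if _h : 0 < n then
    let digit := PySem.Int.mod n 10
    let n' := PySem.Int.floordiv n 10
    pvLoopA n' (if maxNum < digit then digit else maxNum)
  else maxNum
termination_by n.toNat
decreasing_by
  have : PySem.Int.floordiv n 10 = n / 10 := PySem.Int.floordiv_eq_ediv_of_pos (by omega)
  simp only [this]; omega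

def upper_from_random (n : Int) : Int := pvLoopA n 0

-- ===== PORT B =====
-- Source B: if n <= 0: return 0; return max(int(d) for d in str(n)).
-- max over the (nonempty, for n > 0) digit list is ported as PySem.List.maxD with default 0;
-- int(d) for a single decimal digit character d is exactly d.toNat - 48.
def upper_from_random_alt (n : Int) : Int :=
  if n ≤ 0 then 0
  else PySem.List.maxD ((PySem.Int.toChars n).map (fun c => ((c.toNat : Int) - 48))) (fun x => x) 0

-- ===== PRECONDITION & SPEC =====
def Spec_upper_from_random (n : Int) (out : Int) : Prop := out = upper_from_random_alt n
instance (n : Int) (out : Int) : Decidable (Spec_upper_from_random n out) := by unfold Spec_upper_from_random; infer_instance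

-- ===== CLAIM (what is proved, stated in full; the proofs are below) =====
def Claim_equal_upper_from_random : Prop := ∀ (n : Int), Dom_upper_from_random n → Spec_upper_from_random n (upper_from_random n)

-- ===== LEMMAS AND PROOFS =====

-- structural form of Nat.toDigits 10 (fuel removed)
def pvDigits (m : Nat) : List Char :=
  if h : m < 10 then [Nat.digitChar (m % 10)]
  else pvDigits (m / 10) ++ [Nat.digitChar (m % 10)]
termination_by m
decreasing_by omega

lemma pvCoreAcc (f : Nat) : ∀ (n : Nat) (acc : List Char),
    Nat.toDigitsCore 10 f n acc = Nat.toDigitsCore 10 f n [] ++ acc := by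
  induction f with
  | zero => intro n acc; simp [Nat.toDigitsCore]
  | succ f ih =>
    intro n acc
    simp only [Nat.toDigitsCore]
    by_cases h : n / 10 = 0
    · simp [h]
    · simp only [h, if_false]
      rw [ih (n / 10) (Nat.digitChar (n % 10) :: acc), ih (n / 10) [Nat.digitChar (n % 10)]]
      simp

lemma pvCoreEq (f : Nat) : ∀ n : Nat, n < f → Nat.toDigitsCore 10 f n [] = pvDigits n := by
  induction f with
  | zero => intro n hn; omega
  | succ f ih =>
    intro n hn
    rw [pvDigits]
    simp only [Nat.toDigitsCore]
    by_cases h : n < 10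
    · have : n / 10 = 0 := by omega
      simp [this, h]
    · have h0 : n / 10 ≠ 0 := by omega
      rw [if_neg h0, dif_neg h, pvCoreAcc, ih (n / 10) (by omega)]

lemma pvToDigits_eq (m : Nat) : Nat.toDigits 10 m = pvDigits m :=
  pvCoreEq (m + 1) m (Nat.lt_succ_self m)

lemma pvDigits_mem (m : Nat) : ∀ c ∈ pvDigits m, ∃ d : Nat, d < 10 ∧ c = Nat.digitChar d := by
  induction m using Nat.strong_induction_on with
  | _ m ih =>
    intro c hc
    rw [pvDigits] at hc
    by_cases h : m < 10
    · simp [h] at hc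
      exact ⟨m % 10, by omega, hc⟩
    · simp [h] at hc
      rcases hc with hc | hc
      · exact ih (m / 10) (by omega) c hc
      · exact ⟨m % 10, by omega, hc⟩

lemma pvDigitVal (d : Nat) (hd : d < 10) :
    ((Nat.digitChar d).toNat : Int) - 48 = (d : Int) := by
  interval_cases d <;> decide

lemma pvDigitNonneg (d : Nat) (hd : d < 10) :
    0 ≤ ((Nat.digitChar d).toNat : Int) - 48 := by
  interval_cases d <;> decide

lemma pvDigits_ne_nil (m : Nat) : pvDigits m ≠ [] := by
  rw [pvDigits]
  by_cases h : m < 10 <;> simp [h]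

lemma pvFoldlMaxOut (t : List Int) : ∀ (a d : Int),
    t.foldl max (max a d) = max (t.foldl max a) d := by
  induction t with
  | nil => intro a d; simp
  | cons x t ih =>
    intro a d
    simp only [List.foldl_cons]
    rw [show max (max a d) x = max (max a x) d by simp only [max_def]; split_ifs <;> omega]
    exact ih (max a x) d

lemma pvKey (m : Nat) : 0 < m → ∀ acc : Int,
    pvLoopA (m : Int) acc = ((pvDigits m).map (fun c => ((c.toNat : Int) - 48))).foldl max acc := by
  induction m using Nat.strong_induction_on with
  | _ m ih =>
    intro hm acc
    rw [pvLoopA]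
    have hpos : (0 : Int) < (m : Int) := by exact_mod_cast hm
    simp only [hpos, dif_pos]
    have hmod : PySem.Int.mod (m : Int) 10 = ((m % 10 : Nat) : Int) := PySem.Int.mod_natCast m 10
    have hdiv : PySem.Int.floordiv (m : Int) 10 = ((m / 10 : Nat) : Int) := PySem.Int.floordiv_natCast m 10
    have hmax : (if acc < PySem.Int.mod (m : Int) 10 then PySem.Int.mod (m : Int) 10 else acc)
        = max acc ((m % 10 : Nat) : Int) := by
      rw [hmod]; simp only [max_def]; split_ifs <;> omega
    rw [hmax, hdiv]
    rw [pvDigits]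
    by_cases h : m < 10
    · have h0 : m / 10 = 0 := by omega
      rw [h0]
      rw [pvLoopA]
      simp only [dif_neg (by omega : ¬ (0:Int) < ((0:Nat):Int))]
      simp [h, pvDigitVal (m % 10) (by omega)]
    · have h0 : 0 < m / 10 := by omega
      rw [ih (m / 10) (by omega) h0 (max acc ((m % 10 : Nat) : Int))]
      simp only [h, dif_neg, not_false_iff, List.map_append, List.foldl_append, List.map_cons,
        List.map_nil, List.foldl_cons, List.foldl_nil]
      rw [pvDigitVal (m % 10) (by omega)]
      exact pvFoldlMaxOut _ acc ((m % 10 : Nat) : Int)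

lemma pvMax?_cons : ∀ (t : List Int) (a : Int),
    PySem.List.max? (a :: t) (fun v => v) = some (t.foldl max a) := by
  intro t
  induction t with
  | nil => intro a; simp [PySem.List.max?]
  | cons x t ih =>
    intro a
    have h1 : PySem.List.max? (a :: x :: t) (fun v => v)
        = PySem.List.max? (max a x :: t) (fun v => v) := by
      simp only [PySem.List.max?, List.foldl_cons]
      congr 1
      simp only [max_def]
      split_ifs <;> first | rfl | exact congrArg some (by omega)
    rw [h1, ih, List.foldl_cons]

-- ===== VERDICT (by name: the statement is the Claim_ definition above) =====
theorem upper_from_random_spec : Claim_equal_upper_from_random := by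
  unfold Claim_equal_upper_from_random
  intro n _
  unfold Spec_upper_from_random upper_from_random upper_from_random_alt
  by_cases hn : n ≤ 0
  · rw [pvLoopA]
    simp [hn, show ¬ (0:Int) < n by omega]
  · simp only [hn, if_false]
    replace hn : 0 < n := by omega
    have hm : 0 < n.toNat := by omega
    have hcast : ((n.toNat : Nat) : Int) = n := by omega
    have htc : PySem.Int.toChars n = pvDigits n.toNat := by
      unfold PySem.Int.toChars
      rw [if_neg (by omega), pvToDigits_eq]
    have hA : pvLoopA n 0 = ((pvDigits n.toNat).map (fun c => ((c.toNat : Int) - 48))).foldl max 0 := by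
      conv_lhs => rw [← hcast]
      exact pvKey n.toNat hm 0
    rw [hA, htc]
    -- both sides are over the same mapped digit list; compare the folds
    obtain ⟨c, t, hct⟩ : ∃ c t, pvDigits n.toNat = c :: t := by
      cases h : pvDigits n.toNat with
      | nil => exact absurd h (pvDigits_ne_nil n.toNat)
      | cons c t => exact ⟨c, t, rfl⟩
    have hc0 : 0 ≤ ((c.toNat : Int) - 48) := by
      obtain ⟨d, hd, hcd⟩ := pvDigits_mem n.toNat c (by rw [hct]; simp)
      rw [hcd]; exact pvDigitNonneg d hd
    rw [hct]
    simp only [List.map_cons, List.foldl_cons, PySem.List.maxD]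
    rw [pvMax?_cons, show max (0 : Int) ((c.toNat : Int) - 48) = (c.toNat : Int) - 48 by omega]
    rfl
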